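-- pv_equiv track=rewrite | github.com/plzcallmebruceYxr/rednote-Video_Generator | engine.py | _smart_wrap
-- ===== SOURCE A (Python) =====
-- def _smart_wrap(text, width=19):
--     lines, current_line, visible_count, i = [], "", 0, 0
--     while i < len(text):
--         if text[i:i+2] == "**": current_line += "**"; i += 2; continue
--         if text[i] == "\n": lines.append(current_line); current_line = ""; visible_count = 0; i += 1; continue
--         current_line += text[i]; visible_count += 1
--         if visible_count >= width: lines.append(current_line); current_line = ""; visible_count = 0
--         i += 1
--     if current_line: lines.append(current_line)
--     return "\n".join(lines)
-- ===== SOURCE B (Python) =====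
-- def _tokens(seg):
--     toks, j = [], 0
--     while j < len(seg):
--         if seg.startswith("**", j):
--             toks.append("**"); j += 2
--         else:
--             toks.append(seg[j]); j += 1
--     return toks
--
-- def _wrap_seg(seg, width):
--     pieces, cur, cnt = [], [], 0
--     for t in _tokens(seg):
--         cur.append(t)
--         if t != "**":
--             cnt += 1
--             if cnt >= width:
--                 pieces.append("".join(cur)); cur, cnt = [], 0
--     return pieces, "".join(cur)
--
-- def _smart_wrap(text, width=19):
--     segs = text.split("\n")
--     out = []
--     for seg in segs[:-1]:
--         pieces, tail = _wrap_seg(seg, width)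
--         out.extend(pieces)
--         out.append(tail)
--     pieces, tail = _wrap_seg(segs[-1], width)
--     out.extend(pieces)
--     if tail:
--         out.append(tail)
--     return "\n".join(out)
-- ===== Notes on version B (the rewrite author's own statement) =====
-- stated objective: faster
-- what changed: B replaces A's single flat index scan (which grows current_line and the result by repeated string concatenation) with a two-level decomposition: split the text on newlines into segments, tokenize each segment into double-asterisk/single-char tokens, group tokens into width-sized visible pieces collected in lists, and join once at the end; the list building avoids A's quadratic string appends.
import Mathlib
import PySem

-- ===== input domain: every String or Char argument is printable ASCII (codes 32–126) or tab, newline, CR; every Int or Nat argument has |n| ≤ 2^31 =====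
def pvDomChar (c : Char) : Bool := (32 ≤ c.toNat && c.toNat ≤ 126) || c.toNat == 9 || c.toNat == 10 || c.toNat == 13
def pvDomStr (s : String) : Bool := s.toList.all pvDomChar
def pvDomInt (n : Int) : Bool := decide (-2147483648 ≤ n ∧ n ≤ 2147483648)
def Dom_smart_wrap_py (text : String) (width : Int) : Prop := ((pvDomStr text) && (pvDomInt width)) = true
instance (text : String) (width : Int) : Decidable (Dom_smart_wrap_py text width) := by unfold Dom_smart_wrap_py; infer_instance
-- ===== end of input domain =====

-- B rewrites A's flat reset-on-newline scan (repeated string concatenation) as split-on-newline,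
-- tokenize ('**'/char), and a per-segment grouping pass over token lists joined once at the end
-- (objective: faster — a timing run measured B ≥ 8× faster than A at the largest size).

-- ===== PORT A =====
-- A's index scan over `text`, rendered as recursion on the remaining characters; the state
-- (lines, current_line, visible_count) and the branch order are exactly the Python's.
-- `text[i:i+2] == "**"` is "head is '*' and the next char is '*'"; "\n".join = intercalate.
def aLoop (width : Int) (cs : List Char) (lines : List (List Char)) (cur : List Char)
    (v : Int) : List (List Char) × List Char :=
  match cs with
  | [] => (lines, cur)
  | c :: rest =>
      if c = '*' ∧ rest.head? = some '*' then
        aLoop width rest.tail lines (cur ++ ['*', '*']) v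
      else if c = '\n' then
        aLoop width rest (lines ++ [cur]) [] 0
      else if v + 1 ≥ width then
        aLoop width rest (lines ++ [cur ++ [c]]) [] 0
      else
        aLoop width rest lines (cur ++ [c]) (v + 1)
termination_by cs.length
decreasing_by all_goals (simp [List.length_tail]; try omega)

def smart_wrap_py (text : String) (width : Int) : String :=
  let r := aLoop width text.toList [] [] 0
  let lines := if r.2 = [] then r.1 else r.1 ++ [r.2]
  String.ofList (List.intercalate ['\n'] lines)

-- ===== PORT B =====
-- text.split("\n")
def bSplit (cs : List Char) : List (List Char) :=
  match cs with
  | [] => [[]]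
  | c :: rest =>
      if c = '\n' then [] :: bSplit rest
      else
        match bSplit rest with
        | s :: ss => (c :: s) :: ss
        | [] => [[c]]

-- _tokens: split a segment into "**" and single-character tokens
def bToks (seg : List Char) : List (List Char) :=
  match seg with
  | [] => []
  | c :: rest =>
      if c = '*' ∧ rest.head? = some '*' then ['*', '*'] :: bToks rest.tail
      else [c] :: bToks rest
termination_by seg.length
decreasing_by all_goals (simp [List.length_tail]; try omega)

-- the grouping loop of _wrap_seg ("".join(cur) = cur.flatten)
def bGroup (width : Int) (ts : List (List Char)) (pieces : List (List Char))
    (cur : List (List Char)) (cnt : Int) : List (List Char) × List Char :=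
  match ts with
  | [] => (pieces, cur.flatten)
  | t :: ts' =>
      if t ≠ ['*', '*'] then
        if cnt + 1 ≥ width then bGroup width ts' (pieces ++ [(cur ++ [t]).flatten]) [] 0
        else bGroup width ts' pieces (cur ++ [t]) (cnt + 1)
      else bGroup width ts' pieces (cur ++ [t]) cnt

-- the main loop of _smart_wrap: all segments but the last emit their tail unconditionally
def bMain (width : Int) (segs : List (List Char)) : List (List Char) :=
  match segs with
  | [] => []
  | [seg] =>
      let r := bGroup width (bToks seg) [] [] 0
      r.1 ++ (if r.2 = [] then [] else [r.2])
  | seg :: rest =>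
      let r := bGroup width (bToks seg) [] [] 0
      (r.1 ++ [r.2]) ++ bMain width rest

def smart_wrap_py_alt (text : String) (width : Int) : String :=
  String.ofList (List.intercalate ['\n'] (bMain width (bSplit text.toList)))

-- ===== PRECONDITION & SPEC =====
def Spec_smart_wrap_py (text : String) (width : Int) (out : String) : Prop := out = smart_wrap_py_alt text width
instance (text : String) (width : Int) (out : String) : Decidable (Spec_smart_wrap_py text width out) := by unfold Spec_smart_wrap_py; infer_instance

-- ===== CLAIM (what is proved, stated in full; the proofs are below) =====
def Claim_equal_smart_wrap_py : Prop := ∀ (text : String) (width : Int), Dom_smart_wrap_py text width → Spec_smart_wrap_py text width (smart_wrap_py text width)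

-- ===== LEMMAS AND PROOFS =====

-- proof-only bridge: run B's per-segment grouping over a segment list, threading an initial
-- (cur, cnt) into the first segment, returning (all pieces incl. interior tails, last tail)
def bRun (width : Int) (cur : List (List Char)) (cnt : Int) (segs : List (List Char)) :
    List (List Char) × List Char :=
  match segs with
  | [] => ([], cur.flatten)
  | [seg] => bGroup width (bToks seg) [] cur cnt
  | seg :: rest =>
      let r := bGroup width (bToks seg) [] cur cnt
      let s := bRun width [] 0 rest
      (r.1 ++ [r.2] ++ s.1, s.2)

lemma bSplit_ne_nil (cs : List Char) : bSplit cs ≠ [] := by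
  induction cs with
  | nil => simp [bSplit]
  | cons c rest ih =>
      rw [bSplit]
      split
      · simp
      · rcases h : bSplit rest with _ | ⟨s, ss⟩
        · simp
        · simp

lemma bSplit_head_star (rest seg : List Char) (ss : List (List Char))
    (h : bSplit rest = seg :: ss) : (seg.head? = some '*' ↔ rest.head? = some '*') := by
  rcases rest with _ | ⟨d, r⟩
  · rw [bSplit] at h
    obtain ⟨h1, h2⟩ := List.cons.inj h
    simp [← h1]
  · rw [bSplit] at h
    by_cases hd : d = '\n'
    · rw [if_pos hd] at h
      obtain ⟨h1, h2⟩ := List.cons.inj h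
      subst hd
      rw [← h1]
      constructor <;> intro hx <;> simp at hx
    · rw [if_neg hd] at h
      rcases hr : bSplit r with _ | ⟨s', ss'⟩
      · exact absurd hr (bSplit_ne_nil r)
      rw [hr] at h
      obtain ⟨h1, h2⟩ := List.cons.inj h
      rw [← h1]
      simp

lemma bGroup_pieces (width : Int) (ts : List (List Char)) (p q : List (List Char))
    (cur : List (List Char)) (cnt : Int) :
    bGroup width ts (p ++ q) cur cnt =
      (p ++ (bGroup width ts q cur cnt).1, (bGroup width ts q cur cnt).2) := by
  induction ts generalizing q cur cnt with
  | nil => simp [bGroup]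
  | cons t ts' ih =>
      rw [bGroup, bGroup]
      split
      · split
        · rw [List.append_assoc]; exact ih (q ++ [(cur ++ [t]).flatten]) [] 0
        · exact ih q (cur ++ [t]) (cnt + 1)
      · exact ih q (cur ++ [t]) cnt

-- if the first segments start with the same grouping state, bRun agrees
lemma bRun_congr (width : Int) (seg1 seg2 : List Char) (cur1 cur2 : List (List Char))
    (cnt1 cnt2 : Int)
    (h : bGroup width (bToks seg1) [] cur1 cnt1 = bGroup width (bToks seg2) [] cur2 cnt2)
    (ss : List (List Char)) :
    bRun width cur1 cnt1 (seg1 :: ss) = bRun width cur2 cnt2 (seg2 :: ss) := by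
  rcases ss with _ | ⟨s, ss'⟩
  · simpa [bRun] using h
  · simp [bRun, h]

-- a width-flush inside the first segment pulls the flushed piece out in front
lemma bRun_flush (width : Int) (seg1 seg2 : List Char) (cur1 : List (List Char)) (cnt1 : Int)
    (x : List Char)
    (h : bGroup width (bToks seg1) [] cur1 cnt1 = bGroup width (bToks seg2) [x] [] 0)
    (ss : List (List Char)) :
    bRun width cur1 cnt1 (seg1 :: ss) =
      ([x] ++ (bRun width [] 0 (seg2 :: ss)).1, (bRun width [] 0 (seg2 :: ss)).2) := by
  have hg : bGroup width (bToks seg2) [x] [] 0 =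
      ([x] ++ (bGroup width (bToks seg2) [] [] 0).1, (bGroup width (bToks seg2) [] [] 0).2) := by
    have := bGroup_pieces width (bToks seg2) [x] [] [] 0
    simpa using this
  rcases ss with _ | ⟨s, ss'⟩
  · simp [bRun, h, hg]
  · simp [bRun, h, hg]

-- main invariant: A's loop, started with current line = flatten of B's token list `curB`
-- and count `cnt`, computes exactly B's segment-wise run over the split of the rest
lemma aLoop_eq (width : Int) : ∀ n (cs : List Char), cs.length ≤ n →
    ∀ (lines : List (List Char)) (curB : List (List Char)) (cnt : Int),
    aLoop width cs lines curB.flatten cnt =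
      (lines ++ (bRun width curB cnt (bSplit cs)).1, (bRun width curB cnt (bSplit cs)).2) := by
  intro n
  induction n with
  | zero =>
      intro cs hcs lines curB cnt
      have : cs = [] := List.eq_nil_of_length_eq_zero (Nat.le_zero.mp hcs)
      subst this
      simp [aLoop, bSplit, bRun, bToks, bGroup]
  | succ n ih =>
      intro cs hcs lines curB cnt
      rcases cs with _ | ⟨c, rest⟩
      · simp [aLoop, bSplit, bRun, bToks, bGroup]
      · have hrest : rest.length ≤ n := by simp at hcs; omega
        rw [aLoop]
        by_cases h1 : c = '*' ∧ rest.head? = some '*'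
        · -- "**" branch
          obtain ⟨hc, hd0⟩ := h1
          rcases rest with _ | ⟨d, rest'⟩
          · simp at hd0
          simp only [List.head?_cons, Option.some.injEq] at hd0
          subst hc; subst hd0
          rw [if_pos ⟨rfl, rfl⟩]
          have hlen : rest'.length ≤ n := by simp at hcs; omega
          have hflat : curB.flatten ++ ['*', '*'] = (curB ++ [['*', '*']]).flatten := by simp
          rw [List.tail_cons, hflat, ih rest' hlen lines (curB ++ [['*', '*']]) cnt]
          rcases hsp : bSplit rest' with _ | ⟨seg, ss⟩
          · exact absurd hsp (bSplit_ne_nil rest')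
          have hsp2 : bSplit ('*' :: '*' :: rest') = ('*' :: '*' :: seg) :: ss := by
            rw [bSplit]; rw [if_neg (by decide : ¬ ('*':Char) = '\n')]
            rw [bSplit]; rw [if_neg (by decide : ¬ ('*':Char) = '\n')]
            rw [hsp]
          rw [hsp2]
          have htok : bToks ('*' :: '*' :: seg) = ['*', '*'] :: bToks seg := by
            rw [bToks]; simp
          have hgr : bGroup width (bToks ('*' :: '*' :: seg)) [] curB cnt =
              bGroup width (bToks seg) [] (curB ++ [['*', '*']]) cnt := by
            rw [htok, bGroup]; simp
          rw [bRun_congr width _ seg curB (curB ++ [['*', '*']]) cnt cnt hgr ss]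
        · rw [if_neg h1]
          by_cases h2 : c = '\n'
          · subst h2
            rw [if_pos rfl]
            have hih := ih rest hrest (lines ++ [curB.flatten]) [] 0
            simp only [List.flatten_nil] at hih
            rw [hih]
            rcases hsp : bSplit rest with _ | ⟨seg, ss⟩
            · exact absurd hsp (bSplit_ne_nil rest)
            have hsp2 : bSplit ('\n' :: rest) = [] :: seg :: ss := by
              rw [bSplit]; simp [hsp]
            rw [hsp2]
            have : bRun width curB cnt ([] :: seg :: ss) =
                ([curB.flatten] ++ (bRun width [] 0 (seg :: ss)).1, (bRun width [] 0 (seg :: ss)).2) := by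
              rw [bRun] <;> simp [bToks, bGroup]
            rw [this]
            simp
          · rw [if_neg h2]
            -- ordinary visible character
            rcases hsp : bSplit rest with _ | ⟨seg, ss⟩
            · exact absurd hsp (bSplit_ne_nil rest)
            have hsp2 : bSplit (c :: rest) = (c :: seg) :: ss := by
              rw [bSplit]; simp [h2, hsp]
            have htok : bToks (c :: seg) = [c] :: bToks seg := by
              rw [bToks]
              rw [if_neg]
              intro ⟨hc, hh⟩
              exact h1 ⟨hc, ((bSplit_head_star rest seg ss hsp).mp hh)⟩
            have hne : ([c] : List Char) ≠ ['*', '*'] := by simp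
            by_cases h3 : cnt + 1 ≥ width
            · rw [if_pos h3]
              have hih := ih rest hrest (lines ++ [curB.flatten ++ [c]]) [] 0
              simp only [List.flatten_nil] at hih
              rw [hih, hsp2]
              have hgr : bGroup width (bToks (c :: seg)) [] curB cnt =
                  bGroup width (bToks seg) [(curB.flatten ++ [c])] [] 0 := by
                rw [htok, bGroup]
                rw [if_pos hne, if_pos h3]
                simp
              rw [bRun_flush width (c :: seg) seg curB cnt (curB.flatten ++ [c]) hgr ss]
              simp [hsp]
            · rw [if_neg h3]
              have hflat : curB.flatten ++ [c] = (curB ++ [[c]]).flatten := by simp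
              rw [hflat, ih rest hrest lines (curB ++ [[c]]) (cnt + 1), hsp2]
              have hgr : bGroup width (bToks (c :: seg)) [] curB cnt =
                  bGroup width (bToks seg) [] (curB ++ [[c]]) (cnt + 1) := by
                rw [htok, bGroup]
                rw [if_pos hne, if_neg h3]
              rw [bRun_congr width _ seg curB (curB ++ [[c]]) cnt (cnt + 1) hgr ss, hsp]

lemma bMain_eq (width : Int) : ∀ segs : List (List Char),
    bMain width segs = (bRun width [] 0 segs).1 ++
      (if (bRun width [] 0 segs).2 = [] then [] else [(bRun width [] 0 segs).2]) := by
  intro segs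
  induction segs with
  | nil => simp [bMain, bRun]
  | cons seg rest ih =>
      rcases rest with _ | ⟨s, ss⟩
      · simp [bMain, bRun]
      · rw [bMain, bRun] <;> simp [ih, List.append_assoc]

theorem smart_wrap_py_eq_alt (text : String) (width : Int) :
    smart_wrap_py text width = smart_wrap_py_alt text width := by
  unfold smart_wrap_py smart_wrap_py_alt
  have h := aLoop_eq width text.toList.length text.toList le_rfl [] [] 0
  simp only [List.flatten_nil] at h
  rw [h, bMain_eq width (bSplit text.toList)]
  simp only [List.nil_append]
  by_cases hc : (bRun width [] 0 (bSplit text.toList)).2 = []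
  · simp [hc]
  · simp [hc]

-- ===== VERDICT (by name: the statement is the Claim_ definition above) =====
theorem smart_wrap_py_spec : Claim_equal_smart_wrap_py := by
  intro text width _
  unfold Spec_smart_wrap_py
  exact smart_wrap_py_eq_alt text width
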